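-- pv_equiv track=rewrite | github.com/Vickyyu2000/hello-world | SENG265_Project_2/concord2.py | unaligned_output_lines
-- ===== SOURCE A (Python) =====
-- def unaligned_output_lines(exclude_words, index_lines):
-- 	"""parameter 1: a list of exclude words
-- 	   parameter 2: a list of index lines
-- 	   return: 1. a list of unleft-aligned output (same result as in assginment #1)
-- 	           2. a list of sorted index words
-- 			   3. a dictionary: -key: a string of a line in unleft-aligned output
-- 			   			  		 -value: the index number of the word to be left-aligned in the split list of key"""
--
-- 	unaligned_output = []
-- 	unaligned_output_with_index = {}
-- 	index_words = []
--
-- 	for line in index_lines:	#split every single word in index lines and collect into list index_words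
--
-- 		split_line = line.split()
-- 		index_words.extend(split_line)
--
-- 	#remove case-insensitive duplicates from index_words
-- 	temp_dict = {}
-- 	temp_list = []
-- 	for word in index_words:
-- 		if word.lower() in temp_dict:
-- 			continue
-- 		else:
-- 			temp_dict[word.lower()] = word.lower()
-- 			temp_list.append(word)
--
-- 	index_words = temp_list
--
-- 	for word in exclude_words:	#remove any exclude word from index words
-- 		for elem in index_words:
-- 			if elem.casefold() == word.casefold():
-- 				index_words.remove(elem)
--
-- 	index_words = sorted(index_words, key=str.lower)
--
--
-- 	for word in index_words:
--
-- 		temp_word = word.lower()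
--
-- 		for line in index_lines:
--
-- 			temp_line = line.lower()
-- 			split_temp = temp_line.split()
-- 			split_line = line.split()
-- 			num_occur =split_temp.count(temp_word)
--
-- 			if num_occur == 0:
--
-- 				continue
--
-- 			else:
--
-- 				index = split_temp.index(temp_word)
-- 				second_half = split_temp[index:]
--
-- 				while(temp_word in second_half):
--
-- 					second_half[0] = temp_word.upper()
-- 					split_line[index] = temp_word.upper()
-- 					new_line = " ".join(split_line)
-- 					unaligned_output.append(new_line)
-- 					unaligned_output_with_index[new_line] = index
--
-- 					if temp_word in second_half:
--
-- 						index = index + second_half.index(temp_word)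
-- 						second_half = split_temp[index:]
--
-- 					else:
-- 						break
--
-- 	return unaligned_output, index_words, unaligned_output_with_index
-- ===== SOURCE B (Python) =====
-- def unaligned_output_lines(exclude_words, index_lines):
--     """Same contract as A, by a word->occurrence index: tokenize each line once,
--     build in one pass the surviving word list and a dict mapping each lowered
--     word to all its (line, position) occurrences, then emit the highlighted
--     lines for each sorted word straight from its occurrence list (no scan over
--     the lines per word)."""
--     toks = [line.split() for line in index_lines]
--     excl = {w.casefold() for w in exclude_words}
--     seen = set()
--     words = []
--     for ts in toks:
--         for w in ts:
--             lw = w.lower()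
--             if lw not in seen:
--                 seen.add(lw)
--                 if lw not in excl:
--                     words.append(w)
--     words.sort(key=str.lower)
--     occ = {}
--     for ln, ts in enumerate(toks):
--         for p, t in enumerate(ts):
--             occ.setdefault(t.lower(), []).append((ln, p))
--     out = []
--     out_index = {}
--     for word in words:
--         lw = word.lower()
--         up = lw.upper()
--         occs = occ[lw]
--         i = 0
--         n = len(occs)
--         while i < n:
--             ln = occs[i][0]
--             cur = list(toks[ln])
--             while i < n and occs[i][0] == ln:
--                 p = occs[i][1]
--                 cur[p] = up
--                 s = " ".join(cur)
--                 out.append(s)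
--                 out_index[s] = p
--                 i += 1
--     return out, words, out_index
-- ===== Notes on version B (the rewrite author's own statement) =====
-- stated objective: faster
-- what changed: B tokenizes each line once and builds a word-to-occurrences index dict ((line,position) pairs) in a single pass, then emits the highlighted lines for each sorted word directly from its occurrence list, so the per-word scan over all index lines (A re-splits and re-scans every line for every word with count/index/slice juggling) disappears.
import Mathlib
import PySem

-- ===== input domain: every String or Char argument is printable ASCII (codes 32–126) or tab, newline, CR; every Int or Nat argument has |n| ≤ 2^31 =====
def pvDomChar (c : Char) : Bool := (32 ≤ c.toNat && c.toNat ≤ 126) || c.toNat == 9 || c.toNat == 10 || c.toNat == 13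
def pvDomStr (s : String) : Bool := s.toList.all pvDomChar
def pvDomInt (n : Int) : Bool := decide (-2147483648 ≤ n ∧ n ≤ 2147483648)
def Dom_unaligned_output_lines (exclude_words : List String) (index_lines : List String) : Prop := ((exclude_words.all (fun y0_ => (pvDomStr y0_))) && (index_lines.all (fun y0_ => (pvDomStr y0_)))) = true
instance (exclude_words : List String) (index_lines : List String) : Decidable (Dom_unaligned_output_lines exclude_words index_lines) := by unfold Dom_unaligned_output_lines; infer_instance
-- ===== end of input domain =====

-- B replaces A's per-word scan over every index line by a word → (line, position) occurrence
-- index built in one tokenization pass, and emits the highlighted lines per sorted word straight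
-- from that index (objective: faster); return value only, neither version mutates an argument.

-- ===== PORT A =====
-- Python 'for elem in index_words: if elem.casefold() == word.casefold(): index_words.remove(elem)':
-- CPython iterates by an internal index over the list being mutated; .remove erases the FIRST equal
-- element (present here: elem is lst[i]). casefold is ported as lower — exact on the ASCII domain Dom_.
def pvRemoveA (word : String) (lst : List String) (i : Nat) : List String :=
  if h : i < lst.length then
    let elem := lst[i]
    if PySem.Str.lower elem = PySem.Str.lower word then
      pvRemoveA word (lst.erase elem) (i + 1)
    else
      pvRemoveA word lst (i + 1)
  else lst
termination_by lst.length - i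
decreasing_by
  · have hm : (lst.erase lst[i]).length = lst.length - 1 :=
      List.length_erase_of_mem (lst.getElem_mem h)
    omega
  · omega

-- the 'while(temp_word in second_half)' loop; fuel makes it total (Python diverges exactly where
-- the fuel runs out, i.e. when temp_word.upper() == temp_word — excluded by Pre_).
-- 'split_temp[index:]' with a nonnegative index is List.drop; list mutation 'xs[i] = v' is List.set.
def pvWhileA (tw : String) (split_temp : List String) :
    Nat → Nat → List String → List String → List String → PySem.Dict String Int →
    List String × PySem.Dict String Int
  | 0, _, _, _, out, d => (out, d)
  | fuel + 1, index, second_half, split_line, out, d =>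
    if second_half.contains tw then
      let sh' := second_half.set 0 (PySem.Str.upper tw)
      let sl' := split_line.set index (PySem.Str.upper tw)
      let new_line := PySem.Str.join " " sl'
      let out' := out ++ [new_line]
      let d' := d.insert new_line (index : Int)
      if sh'.contains tw then
        match PySem.List.index? sh' tw with
        | some off => pvWhileA tw split_temp fuel (index + off) (split_temp.drop (index + off)) sl' out' d'
        | none => (out', d')  -- unreachable: the contains test just succeeded
      else (out', d')
    else (out, d)

def pvLineA (tw : String) (st : List String × PySem.Dict String Int) (line : String) :
    List String × PySem.Dict String Int :=
  let split_temp := PySem.Str.split₀ (PySem.Str.lower line)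
  let split_line := PySem.Str.split₀ line
  if PySem.List.count split_temp tw = 0 then st
  else
    match PySem.List.index? split_temp tw with
    | some index =>
        pvWhileA tw split_temp (split_temp.length + 1) index (split_temp.drop index) split_line st.1 st.2
    | none => st  -- unreachable: count ≠ 0

def unaligned_output_lines (exclude_words : List String) (index_lines : List String) :
    List String × List String × (List (String × Int)) :=
  let index_words0 := index_lines.foldl (fun acc line => acc ++ PySem.Str.split₀ line) []
  let temp := index_words0.foldl
    (fun (st : PySem.Dict String String × List String) word =>
      if st.1.contains (PySem.Str.lower word) then st
      else (st.1.insert (PySem.Str.lower word) (PySem.Str.lower word), st.2 ++ [word]))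
    (PySem.Dict.empty, [])
  let index_words1 := temp.2
  let index_words2 := exclude_words.foldl (fun lst word => pvRemoveA word lst 0) index_words1
  let index_words := PySem.List.sorted index_words2 PySem.Str.lower
  let r := index_words.foldl
    (fun st word => index_lines.foldl (pvLineA (PySem.Str.lower word)) st)
    ([], PySem.Dict.empty)
  (r.1, index_words, r.2.items)

-- ===== PORT B =====
-- Source B's nested 'while i < n' loops over one word's occurrence list: the outer step picks the
-- current line's tokens (toks[ln]; in-range, so pyGet?+getD is exact) and the inner while — it
-- consumes the maximal run of occurrences with the same line number — is ported as
-- takeWhile/dropWhile at the same test, folding the cumulative highlight over the run.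
def pvGroupB (toks : List (List String)) (up : String) :
    List (Int × Int) → List String × PySem.Dict String Int → List String × PySem.Dict String Int
  | [], st => st
  | (ln, p) :: occs, st =>
    let cur := (PySem.List.pyGet? toks ln).getD []
    let grp := ((ln, p) :: occs).takeWhile (fun q => q.1 == ln)
    let rest := ((ln, p) :: occs).dropWhile (fun q => q.1 == ln)
    let r := grp.foldl
      (fun (acc : List String × List String × PySem.Dict String Int) q =>
        let cur' := PySem.List.pySetD acc.1 q.2 up
        let s := PySem.Str.join " " cur'
        (cur', acc.2.1 ++ [s], acc.2.2.insert s q.2))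
      (cur, st)
    pvGroupB toks up rest r.2
termination_by occs => occs.length
decreasing_by
  simp only [List.dropWhile_cons, beq_self_eq_true, if_true, List.length_cons]
  have h := List.length_dropWhile_le (fun (q : Int × Int) => q.1 == ln) occs
  omega

-- casefold is ported as lower — exact on the ASCII domain Dom_; 'occ[lw]' is getD with []:
-- the key is always present (every surviving word is one of the tokens that built occ).
def unaligned_output_lines_alt (exclude_words : List String) (index_lines : List String) :
    List String × List String × (List (String × Int)) :=
  let toks := index_lines.map PySem.Str.split₀
  let excl : PySem.Set String := PySem.Set.ofList (exclude_words.map PySem.Str.lower)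
  let words := (toks.foldl
    (fun st ts => ts.foldl
      (fun (st : PySem.Set String × List String) w =>
        if st.1.contains (PySem.Str.lower w) then st
        else (PySem.Set.add st.1 (PySem.Str.lower w),
              if excl.contains (PySem.Str.lower w) then st.2 else st.2 ++ [w]))
      st)
    (PySem.Set.empty, [])).2
  let words := PySem.List.sorted words PySem.Str.lower
  let occ := (PySem.List.enumerate toks 0).foldl
    (fun occ q => (PySem.List.enumerate q.2 0).foldl
      (fun (occ : PySem.Dict String (List (Int × Int))) r =>
        occ.modify (PySem.Str.lower r.2) [] (· ++ [(q.1, r.1)]))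
      occ)
    PySem.Dict.empty
  let r := words.foldl
    (fun st word =>
      pvGroupB toks (PySem.Str.upper (PySem.Str.lower word))
        (occ.getD (PySem.Str.lower word) []) st)
    ([], PySem.Dict.empty)
  (r.1, words, r.2.items)

-- ===== PRECONDITION & SPEC =====
-- Pre_ excludes exactly the inputs on which the Python A never returns: if some token of an index
-- line survives the exclusion (its lowered form is not among the lowered exclude words) and
-- uppercasing its lowered form leaves it unchanged (no letter in it), A's inner
-- 'while temp_word in second_half' loop re-finds that word forever and A diverges.
def Pre_unaligned_output_lines (exclude_words : List String) (index_lines : List String) : Prop :=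
  ∀ line ∈ index_lines, ∀ t ∈ PySem.Str.split₀ line,
    PySem.Str.lower t ∉ exclude_words.map PySem.Str.lower →
    PySem.Str.upper (PySem.Str.lower t) ≠ PySem.Str.lower t
instance (exclude_words : List String) (index_lines : List String) :
    Decidable (Pre_unaligned_output_lines exclude_words index_lines) := by
  unfold Pre_unaligned_output_lines; infer_instance

def pvWitness_unaligned_output_lines : List String × List String :=
  (["the"], ["a cat"])

def Spec_unaligned_output_lines (exclude_words : List String) (index_lines : List String)
    (out : List String × List String × (List (String × Int))) : Prop :=
  out = unaligned_output_lines_alt exclude_words index_lines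
instance (exclude_words : List String) (index_lines : List String)
    (out : List String × List String × (List (String × Int))) :
    Decidable (Spec_unaligned_output_lines exclude_words index_lines out) := by
  unfold Spec_unaligned_output_lines; infer_instance

-- ===== CLAIM (what is proved, stated in full; the proofs are below) =====
def Claim_equal_unaligned_output_lines : Prop :=
  ∀ (exclude_words : List String) (index_lines : List String),
    Dom_unaligned_output_lines exclude_words index_lines →
    Pre_unaligned_output_lines exclude_words index_lines →
    Spec_unaligned_output_lines exclude_words index_lines
      (unaligned_output_lines exclude_words index_lines)

-- ===== LEMMAS AND PROOFS =====

-- positions (0-based, labelled from n) of tw in a token list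
def pvPos (tw : String) : List String → Nat → List Nat
  | [], _ => []
  | x :: xs, n => if x = tw then n :: pvPos tw xs (n + 1) else pvPos tw xs (n + 1)

-- canonical cumulative-highlight emission at a list of positions
def pvEmit (TW : String) : List Nat → List String → List String × PySem.Dict String Int →
    List String × PySem.Dict String Int
  | [], _, st => st
  | p :: ps, cur, st =>
    let cur' := cur.set p TW
    let nl := PySem.Str.join " " cur'
    pvEmit TW ps cur' (st.1 ++ [nl], st.2.insert nl (p : Int))

-- a position list tagged with its line number
def pvTag (ln : Int) : List Nat → List (Int × Int)
  | [] => []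
  | p :: ps => (ln, (p : Int)) :: pvTag ln ps

-- one word's occurrences across the lines from line number ln on, tagged with the line number
def pvFlatOcc (tw : String) : List (List String) → Nat → List (Int × Int)
  | [], _ => []
  | ts :: rest, ln => pvTag (ln : Int) (pvPos tw (ts.map PySem.Str.lower) 0) ++ pvFlatOcc tw rest (ln + 1)

-- dedup keeping first occurrence per lowered form (A's phase)
def pvDDA : List String → List String → List String
  | _, [] => []
  | seen, w :: ws =>
    if PySem.Str.lower w ∈ seen then pvDDA seen ws
    else w :: pvDDA (PySem.Str.lower w :: seen) ws

-- dedup + exclusion in one pass (B's phase)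
def pvDDB (excl : List String) : List String → List String → List String
  | _, [] => []
  | seen, w :: ws =>
    if PySem.Str.lower w ∈ seen then pvDDB excl seen ws
    else if PySem.Str.lower w ∈ excl then pvDDB excl (PySem.Str.lower w :: seen) ws
    else w :: pvDDB excl (PySem.Str.lower w :: seen) ws

theorem pvPos_ne_nil_iff (tw : String) (xs : List String) (n : Nat) :
    pvPos tw xs n ≠ [] ↔ tw ∈ xs := by
  induction xs generalizing n with
  | nil => simp [pvPos]
  | cons x xs ih =>
    by_cases hx : x = tw <;> simp [pvPos, hx, ih]
    intro h; exact absurd h.symm hx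

theorem pvPos_head? (tw : String) (xs : List String) (n : Nat) :
    (pvPos tw xs n).head? = (PySem.List.index? xs tw).map (fun i => n + i) := by
  induction xs generalizing n with
  | nil => simp [pvPos, PySem.List.index?]
  | cons x xs ih =>
    by_cases hx : x = tw
    · simp [pvPos, hx, PySem.List.index?, List.idxOf?_cons]
    · have hb : (x == tw) = false := by simp [hx]
      simp only [pvPos, if_neg hx, PySem.List.index?, List.idxOf?_cons, hb, if_neg]
      rw [ih]
      simp only [PySem.List.index?, Option.map_map, Function.comp_def]
      cases List.idxOf? tw xs <;> simp <;> omega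

theorem pvPos_le (tw : String) (xs : List String) (n : Nat) :
    ∀ m ∈ pvPos tw xs n, n ≤ m := by
  induction xs generalizing n with
  | nil => simp [pvPos]
  | cons x xs ih =>
    intro m hm
    by_cases hx : x = tw <;> simp [pvPos, hx] at hm
    · rcases hm with rfl | hm
      · omega
      · have := ih (n+1) m hm; omega
    · have := ih (n+1) m hm; omega

theorem pvPos_length_le (tw : String) (xs : List String) (n : Nat) :
    (pvPos tw xs n).length ≤ xs.length := by
  induction xs generalizing n with
  | nil => simp [pvPos]
  | cons x xs ih =>
    by_cases hx : x = tw <;> simp [pvPos, hx]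
    · exact ih (n+1)
    · exact Nat.le_succ_of_le (ih (n+1))

theorem pvPos_drop (tw : String) (xs : List String) (n q : Nat) (r : List Nat)
    (h : pvPos tw xs n = q :: r) :
    pvPos tw (xs.drop (q - n)) q = q :: r := by
  induction xs generalizing n with
  | nil => simp [pvPos] at h
  | cons x xs ih =>
    by_cases hx : x = tw
    · simp only [pvPos, if_pos hx] at h
      obtain ⟨rfl, rfl⟩ := List.cons.inj h
      simp [pvPos, hx]
    · simp only [pvPos, if_neg hx] at h
      have hle : n + 1 ≤ q := pvPos_le tw xs (n+1) q (h ▸ List.mem_cons_self ..)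
      have := ih (n+1) h
      have hq : q - n = (q - (n+1)) + 1 := by omega
      rw [hq]
      simpa using this

theorem pvCount_eq (tw : String) (xs : List String) (n : Nat) :
    PySem.List.count xs tw = (pvPos tw xs n).length := by
  induction xs generalizing n with
  | nil => simp [pvPos, PySem.List.count]
  | cons x xs ih =>
    by_cases hx : x = tw <;>
      simp [pvPos, hx, PySem.List.count, List.count_cons, ih (n+1)] <;>
      simp [PySem.List.count] at ih <;> simp [ih (n+1), hx]

theorem pvPos_drop_cons (tw : String) (lt : List String) (p : Nat) (rest : List Nat)
    (h : pvPos tw (lt.drop p) p = p :: rest) :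
    lt.drop p = tw :: lt.drop (p + 1) ∧ rest = pvPos tw (lt.drop (p + 1)) (p + 1) := by
  cases hd : lt.drop p with
  | nil => rw [hd] at h; simp [pvPos] at h
  | cons y s' =>
    have hs' : s' = lt.drop (p + 1) := by
      have : (lt.drop p).tail = lt.drop (p + 1) := by
        rw [← List.drop_drop]
        simp [List.drop_one]
      rw [hd] at this; simpa using this
    rw [hd] at h
    by_cases hy : y = tw
    · subst hy
      have h' : pvPos y s' (p + 1) = rest := by simpa [pvPos] using h
      exact ⟨by rw [← hs'], by rw [← hs', h']⟩
    · simp only [pvPos, if_neg hy] at h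
      have := pvPos_le tw s' (p + 1) p (h ▸ List.mem_cons_self ..)
      omega

theorem pvWhileA_eq_emit (tw : String) (htw : PySem.Str.upper tw ≠ tw) (lt : List String) :
    ∀ (rest : List Nat) (p : Nat) (sl out : List String) (d : PySem.Dict String Int)
      (fuel : Nat), rest.length < fuel →
      pvPos tw (lt.drop p) p = p :: rest →
      pvWhileA tw lt fuel p (lt.drop p) sl out d
        = pvEmit (PySem.Str.upper tw) (p :: rest) sl (out, d) := by
  intro rest
  induction rest with
  | nil =>
    intro p sl out d fuel hf h
    obtain ⟨hd, hrest⟩ := pvPos_drop_cons tw lt p [] h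
    obtain ⟨fuel, rfl⟩ : ∃ f, fuel = f + 1 := ⟨fuel - 1, by omega⟩
    have hnotmem : tw ∉ lt.drop (p + 1) := by
      rw [← pvPos_ne_nil_iff tw (lt.drop (p + 1)) (p + 1), not_not]
      exact hrest.symm
    rw [pvWhileA, hd]
    have hc : (tw :: lt.drop (p + 1)).contains tw = true := by
      simp [List.contains_iff_mem]
    rw [if_pos hc]
    simp only [List.set_cons_zero]
    have hc2 : ¬ ((PySem.Str.upper tw :: lt.drop (p + 1)).contains tw = true) := by
      rw [List.contains_iff_mem]
      simp [hnotmem]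
      exact fun hh => htw hh.symm
    rw [if_neg hc2]
    simp [pvEmit]
  | cons q rest' ih =>
    intro p sl out d fuel hf h
    obtain ⟨hd, hrest⟩ := pvPos_drop_cons tw lt p (q :: rest') h
    obtain ⟨fuel, rfl⟩ : ∃ f, fuel = f + 1 := ⟨fuel - 1, by omega⟩
    have hmem : tw ∈ lt.drop (p + 1) := by
      rw [← pvPos_ne_nil_iff tw (lt.drop (p + 1)) (p + 1), ← hrest]
      simp
    rw [pvWhileA, hd]
    have hc : (tw :: lt.drop (p + 1)).contains tw = true := by
      simp [List.contains_iff_mem]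
    rw [if_pos hc]
    simp only [List.set_cons_zero]
    have hc2 : (PySem.Str.upper tw :: lt.drop (p + 1)).contains tw = true := by
      simp [List.contains_iff_mem, hmem]
    rw [if_pos hc2]
    -- index? on the modified suffix
    obtain ⟨i, hi⟩ : ∃ i, PySem.List.index? (lt.drop (p + 1)) tw = some i := by
      cases hix : PySem.List.index? (lt.drop (p + 1)) tw with
      | none =>
        exfalso
        have : tw ∉ lt.drop (p + 1) := by
          simpa [PySem.List.index?, List.idxOf?_eq_none_iff] using hix
        exact this hmem
      | some i => exact ⟨i, rfl⟩
    have hq : q = p + 1 + i := by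
      have hh := pvPos_head? tw (lt.drop (p + 1)) (p + 1)
      rw [← hrest, hi] at hh
      simpa using hh
    have hix2 : PySem.List.index? (PySem.Str.upper tw :: lt.drop (p + 1)) tw = some (i + 1) := by
      have hne : (PySem.Str.upper tw == tw) = false := by
        simp [htw]
      simp [PySem.List.index?, List.idxOf?_cons, hne] at hi ⊢
      simp [hi]
    rw [hix2]
    have hdrop : (lt.drop (p + 1)).drop (q - (p + 1)) = lt.drop q := by
      rw [List.drop_drop]
      congr 1
      omega
    have hnext : pvPos tw (lt.drop q) q = q :: rest' := by
      have h2 := pvPos_drop tw (lt.drop (p + 1)) (p + 1) q rest' hrest.symm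
      rwa [hdrop] at h2
    have hq' : p + (i + 1) = q := by omega
    simp only []
    rw [hq']
    rw [ih q (sl.set p (PySem.Str.upper tw)) _ _ fuel (by simpa using hf) hnext]
    simp [pvEmit]

theorem pvIsspace_of_letterish (d : Char) (h1 : 65 ≤ d.toNat) (h2 : d.toNat ≤ 122) :
    PySem.Chars.isspace d = false := by
  unfold PySem.Chars.isspace
  simp only [Bool.or_eq_false_iff, Bool.and_eq_false_iff, decide_eq_false_iff_not]
  omega

theorem pvIsspace_lowerChar (c : Char) :
    PySem.Chars.isspace (PySem.Chars.lowerChar c) = PySem.Chars.isspace c := by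
  unfold PySem.Chars.lowerChar
  by_cases h : PySem.Chars.isupper c
  · rw [if_pos h]
    unfold PySem.Chars.isupper at h
    have hb : 65 ≤ c.toNat ∧ c.toNat ≤ 90 := by
      simp [Char.le_def] at h
      exact ⟨h.1, h.2⟩
    have hv : (c.toNat + 32).isValidChar := by
      left; omega
    have ht : (Char.ofNat (c.toNat + 32)).toNat = c.toNat + 32 := by
      rw [Char.toNat_ofNat, if_pos hv]
    rw [pvIsspace_of_letterish (Char.ofNat (c.toNat + 32)) (by rw [ht]; omega) (by rw [ht]; omega),
        pvIsspace_of_letterish c (by omega) (by omega)]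
  · rw [if_neg h]

theorem pvSplitGo_lower (s cur : List Char) (acc : List (List Char)) :
    PySem.Chars.split₀.go (s.map PySem.Chars.lowerChar) (cur.map PySem.Chars.lowerChar)
        (acc.map (List.map PySem.Chars.lowerChar))
      = (PySem.Chars.split₀.go s cur acc).map (List.map PySem.Chars.lowerChar) := by
  induction s generalizing cur acc with
  | nil =>
    unfold PySem.Chars.split₀.go
    by_cases hc : cur.isEmpty
    · have hc' : (cur.map PySem.Chars.lowerChar).isEmpty = true := by
        simp [List.isEmpty_iff] at hc ⊢; exact hc
      simp [hc, hc']
    · have hc' : (cur.map PySem.Chars.lowerChar).isEmpty = false := by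
        simp [List.isEmpty_iff] at hc ⊢; exact hc
      simp [hc, hc', List.map_reverse]
  | cons c rest ih =>
    simp only [List.map_cons]
    unfold PySem.Chars.split₀.go
    rw [pvIsspace_lowerChar]
    by_cases hs : PySem.Chars.isspace c
    · rw [if_pos hs, if_pos hs]
      by_cases hc : cur.isEmpty
      · have hc' : (cur.map PySem.Chars.lowerChar).isEmpty = true := by
          simp [List.isEmpty_iff] at hc ⊢; exact hc
        rw [if_pos hc, if_pos hc']
        exact ih [] acc
      · have hc' : (cur.map PySem.Chars.lowerChar).isEmpty = false := by
          simp [List.isEmpty_iff] at hc ⊢; exact hc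
        have hcne : cur ≠ [] := by simpa [List.isEmpty_iff] using hc
        rw [if_neg (by simp [List.isEmpty_iff, hcne]), if_neg (by simp [List.isEmpty_iff, hcne])]
        have := ih [] (cur.reverse :: acc)
        simpa [List.map_reverse] using this
    · rw [if_neg hs, if_neg hs]
      exact ih (c :: cur) acc

theorem pvSplit_lower (line : String) :
    PySem.Str.split₀ (PySem.Str.lower line) = (PySem.Str.split₀ line).map PySem.Str.lower := by
  unfold PySem.Str.split₀ PySem.Str.lower
  have h0 : (String.ofList (PySem.Chars.lower line.toList)).toList = PySem.Chars.lower line.toList := by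
    simp
  rw [h0]
  unfold PySem.Chars.lower PySem.Chars.split₀
  have := pvSplitGo_lower line.toList [] []
  simp only [List.map_nil] at this
  rw [this]
  simp [List.map_map, Function.comp_def, PySem.Chars.lower]

-- A's per-line scan produces exactly the cumulative emission at this word's positions
theorem pvLineA_eq_emit (tw : String) (htw : PySem.Str.upper tw ≠ tw)
    (st : List String × PySem.Dict String Int) (line : String) :
    pvLineA tw st line =
      pvEmit (PySem.Str.upper tw)
        (pvPos tw ((PySem.Str.split₀ line).map PySem.Str.lower) 0) (PySem.Str.split₀ line) st := by
  unfold pvLineA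
  rw [pvSplit_lower line]
  set ls := (PySem.Str.split₀ line).map PySem.Str.lower with hls
  cases hpos : pvPos tw ls 0 with
  | nil =>
    have hc : PySem.List.count ls tw = 0 := by
      rw [pvCount_eq tw ls 0, hpos]; rfl
    rw [if_pos hc]
    simp [pvEmit]
  | cons p rest =>
    have hc : PySem.List.count ls tw ≠ 0 := by
      rw [pvCount_eq tw ls 0, hpos]; simp
    rw [if_neg hc]
    have hidx : PySem.List.index? ls tw = some p := by
      have hh := pvPos_head? tw ls 0
      rw [hpos] at hh
      cases hix : PySem.List.index? ls tw with
      | none => rw [hix] at hh; simp at hh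
      | some i =>
        rw [hix] at hh
        simp at hh
        rw [hh]
    rw [hidx]
    simp only []
    have hdrop : pvPos tw (ls.drop p) p = p :: rest := by
      have := pvPos_drop tw ls 0 p rest hpos
      simpa using this
    have hlen : rest.length < ls.length + 1 := by
      have := pvPos_length_le tw ls 0
      rw [hpos] at this
      simp at this
      omega
    rw [pvWhileA_eq_emit tw htw ls rest p (PySem.Str.split₀ line) st.1 st.2 (ls.length + 1) hlen hdrop]

theorem pvRemoveA_eq_filter (w : String) (lst : List String) (i : Nat)
    (hnd : (lst.map PySem.Str.lower).Nodup)
    (h : ∀ x ∈ lst.take i, PySem.Str.lower x ≠ PySem.Str.lower w) :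
    pvRemoveA w lst i =
      lst.take i ++ (lst.drop i).filter (fun x => decide (PySem.Str.lower x ≠ PySem.Str.lower w)) := by
  fun_induction pvRemoveA w lst i with
  | case1 lst i hlt elem heq ih =>
    have hdecomp : lst = lst.take i ++ lst[i] :: lst.drop (i + 1) := by
      conv_lhs => rw [← List.take_append_drop i lst]
      rw [List.drop_eq_getElem_cons hlt]
    have hnotin : lst[i] ∉ lst.take i := fun hx => h _ hx heq
    have herase : lst.erase lst[i] = lst.take i ++ lst.drop (i + 1) := by
      have hc := congrArg (fun l => l.erase lst[i]) hdecomp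
      simp only at hc
      rw [hc, List.erase_append_right _ hnotin, List.erase_cons_head]
    have hallgood : ∀ x ∈ lst.erase lst[i], PySem.Str.lower x ≠ PySem.Str.lower w := by
      intro x hx
      rw [herase] at hx
      rcases List.mem_append.mp hx with hx | hx
      · exact h x hx
      · intro hxw
        have hmapnd := hnd
        rw [hdecomp] at hmapnd
        simp only [List.map_append, List.map_cons] at hmapnd
        have := (List.nodup_append.mp hmapnd).2.1
        have hhd := List.nodup_cons.mp this
        exact hhd.1 (by
          rw [← heq] at hxw
          exact hxw ▸ List.mem_map_of_mem hx)
    rw [ih (List.Nodup.sublist (List.Sublist.map _ (List.erase_sublist)) hnd)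
        (fun x hx => hallgood x (List.mem_of_mem_take hx))]
    have hfself : ∀ (l : List String), (∀ x ∈ l, PySem.Str.lower x ≠ PySem.Str.lower w) →
        l.filter (fun x => decide (PySem.Str.lower x ≠ PySem.Str.lower w)) = l := by
      intro l hl
      apply List.filter_eq_self.mpr
      intro x hx
      simpa using hl x hx
    rw [hfself _ (fun x hx => hallgood x (List.mem_of_mem_drop hx)), List.take_append_drop]
    rw [herase]
    congr 1
    rw [List.drop_eq_getElem_cons hlt]
    rw [List.filter_cons]
    have : (decide (PySem.Str.lower lst[i] ≠ PySem.Str.lower w)) = false := by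
      simp [show PySem.Str.lower lst[i] = PySem.Str.lower w from heq]
    rw [this, if_neg (by simp)]
    apply (hfself _ ?_).symm
    intro x hx
    intro hxw
    have hmapnd := hnd
    rw [hdecomp] at hmapnd
    simp only [List.map_append, List.map_cons] at hmapnd
    have := (List.nodup_append.mp hmapnd).2.1
    have hhd := List.nodup_cons.mp this
    exact hhd.1 (by rw [← heq] at hxw; exact hxw ▸ List.mem_map_of_mem hx)
  | case2 lst i hlt elem hne ih =>
    have htake : lst.take (i + 1) = lst.take i ++ [lst[i]] := by
      rw [List.take_succ]
      simp [List.getElem?_eq_getElem hlt]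
    rw [ih hnd (by
      intro x hx
      rw [htake] at hx
      rcases List.mem_append.mp hx with hx | hx
      · exact h x hx
      · simp at hx
        rw [hx]
        exact hne)]
    rw [htake, List.drop_eq_getElem_cons hlt, List.filter_cons]
    have : (decide (PySem.Str.lower lst[i] ≠ PySem.Str.lower w)) = true := by
      simp only [decide_eq_true_eq]
      exact hne
    rw [this, if_pos rfl, List.append_assoc]
    rfl
  | case3 lst i hge =>
    push_neg at hge
    rw [List.take_of_length_le hge, List.drop_of_length_le hge]
    simp

theorem pvExcl_eq_filter (ex : List String) (lst : List String)
    (hnd : (lst.map PySem.Str.lower).Nodup) :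
    ex.foldl (fun l w => pvRemoveA w l 0) lst =
      lst.filter (fun x => decide (PySem.Str.lower x ∉ ex.map PySem.Str.lower)) := by
  induction ex generalizing lst with
  | nil => simp
  | cons w ex ih =>
    simp only [List.foldl_cons]
    have h0 := pvRemoveA_eq_filter w lst 0 hnd (by simp)
    simp only [List.take_zero, List.drop_zero, List.nil_append] at h0
    rw [h0]
    rw [ih _ (List.Nodup.sublist (List.Sublist.map _ List.filter_sublist) hnd)]
    rw [List.filter_filter]
    apply List.filter_congr
    intro x hx
    simp [List.mem_cons, not_or, Bool.and_comm]

theorem pvDedupA_eq (ws : List String) (d : PySem.Dict String String) (l seen : List String)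
    (hd : ∀ k, d.contains k = decide (k ∈ seen)) :
    (ws.foldl
      (fun (st : PySem.Dict String String × List String) word =>
        if st.1.contains (PySem.Str.lower word) then st
        else (st.1.insert (PySem.Str.lower word) (PySem.Str.lower word), st.2 ++ [word]))
      (d, l)).2 = l ++ pvDDA seen ws := by
  induction ws generalizing d l seen with
  | nil => simp [pvDDA]
  | cons w ws ih =>
    simp only [List.foldl_cons]
    by_cases hm : PySem.Str.lower w ∈ seen
    · rw [if_pos (by rw [hd]; simpa using hm)]
      rw [ih d l seen hd]
      simp [pvDDA, hm]
    · rw [if_neg (by rw [hd]; simpa using hm)]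
      rw [ih _ _ (PySem.Str.lower w :: seen) (by
        intro k
        rw [PySem.Dict.contains_insert, hd]
        simp [List.mem_cons]
        by_cases hk : k = PySem.Str.lower w <;> simp [hk])]
      simp [pvDDA, hm]

theorem pvDedupB_eq (excl : PySem.Set String) (exl : List String)
    (hx : ∀ k, excl.contains k = decide (k ∈ exl))
    (ws : List String) (s : PySem.Set String) (l seen : List String)
    (hs : ∀ k, s.contains k = decide (k ∈ seen)) :
    (ws.foldl
      (fun (st : PySem.Set String × List String) w =>
        if st.1.contains (PySem.Str.lower w) then st
        else (PySem.Set.add st.1 (PySem.Str.lower w),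
              if excl.contains (PySem.Str.lower w) then st.2 else st.2 ++ [w]))
      (s, l)).2 = l ++ pvDDB exl seen ws := by
  induction ws generalizing s l seen with
  | nil => simp [pvDDB]
  | cons w ws ih =>
    simp only [List.foldl_cons]
    by_cases hm : PySem.Str.lower w ∈ seen
    · rw [if_pos (by rw [hs]; simpa using hm)]
      rw [ih s l seen hs]
      simp [pvDDB, hm]
    · rw [if_neg (by rw [hs]; simpa using hm)]
      have hadd : ∀ k, (PySem.Set.add s (PySem.Str.lower w)).contains k
          = decide (k ∈ PySem.Str.lower w :: seen) := by
        intro k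
        have h1 : ((PySem.Set.add s (PySem.Str.lower w)).contains k = true)
            ↔ (k ∈ PySem.Str.lower w :: seen) := by
          rw [PySem.Set.contains_iff, PySem.Set.mem_add, List.mem_cons]
          have h2 : k ∈ s ↔ k ∈ seen := by
            rw [← PySem.Set.contains_iff, hs]; simp
          tauto
        rcases Bool.eq_false_or_eq_true ((PySem.Set.add s (PySem.Str.lower w)).contains k) with hk | hk <;>
          rw [hk] <;> symm
        all_goals first
          | (rw [decide_eq_true_eq]; exact h1.mp hk)
          | (rw [decide_eq_false_iff_not]
             intro hc
             rw [← h1, hk] at hc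
             exact Bool.false_ne_true hc)
      by_cases he : PySem.Str.lower w ∈ exl
      · rw [if_pos (by rw [hx]; simpa using he)]
        rw [ih _ _ (PySem.Str.lower w :: seen) hadd]
        simp [pvDDB, hm, he]
      · rw [if_neg (by rw [hx]; simpa using he)]
        rw [ih _ _ (PySem.Str.lower w :: seen) hadd]
        simp [pvDDB, hm, he]

theorem pvDDA_nodup_lower (ws : List String) :
    ∀ seen : List String, ((pvDDA seen ws).map PySem.Str.lower).Nodup ∧
      ∀ x ∈ pvDDA seen ws, PySem.Str.lower x ∉ seen := by
  induction ws with
  | nil => simp [pvDDA]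
  | cons w ws ih =>
    intro seen
    by_cases hm : PySem.Str.lower w ∈ seen
    · simp only [pvDDA, if_pos hm]
      exact ih seen
    · simp only [pvDDA, if_neg hm]
      obtain ⟨hnd, hnot⟩ := ih (PySem.Str.lower w :: seen)
      refine ⟨?_, ?_⟩
      · simp only [List.map_cons, List.nodup_cons]
        refine ⟨?_, hnd⟩
        intro hc
        obtain ⟨y, hy, hyl⟩ := List.mem_map.mp hc
        have := hnot y hy
        simp [hyl] at this
      · intro x hx
        rcases List.mem_cons.mp hx with rfl | hx
        · exact hm
        · have := hnot x hx
          simp only [List.mem_cons, not_or] at this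
          exact this.2

theorem pvDDA_filter_eq_DDB (exl : List String) (ws : List String) :
    ∀ seen, (pvDDA seen ws).filter (fun x => decide (PySem.Str.lower x ∉ exl)) = pvDDB exl seen ws := by
  induction ws with
  | nil => simp [pvDDA, pvDDB]
  | cons w ws ih =>
    intro seen
    by_cases hm : PySem.Str.lower w ∈ seen
    · simp only [pvDDA, pvDDB, if_pos hm]
      exact ih seen
    · simp only [pvDDA, pvDDB, if_neg hm]
      by_cases he : PySem.Str.lower w ∈ exl
      · rw [if_pos he, List.filter_cons]
        rw [if_neg (by simp [he])]
        exact ih _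
      · rw [if_neg he, List.filter_cons]
        rw [if_pos (by simp [he])]
        rw [ih _]

theorem pvDDB_mem (exl : List String) (ws seen : List String) (x : String)
    (h : x ∈ pvDDB exl seen ws) : x ∈ ws ∧ PySem.Str.lower x ∉ exl := by
  induction ws generalizing seen with
  | nil => simp [pvDDB] at h
  | cons w ws ih =>
    by_cases hm : PySem.Str.lower w ∈ seen
    · simp only [pvDDB, if_pos hm] at h
      obtain ⟨h1, h2⟩ := ih _ h
      exact ⟨List.mem_cons_of_mem _ h1, h2⟩
    · simp only [pvDDB, if_neg hm] at h
      by_cases he : PySem.Str.lower w ∈ exl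
      · rw [if_pos he] at h
        obtain ⟨h1, h2⟩ := ih _ h
        exact ⟨List.mem_cons_of_mem _ h1, h2⟩
      · rw [if_neg he] at h
        rcases List.mem_cons.mp h with rfl | h
        · exact ⟨List.mem_cons_self .., he⟩
        · obtain ⟨h1, h2⟩ := ih _ h
          exact ⟨List.mem_cons_of_mem _ h1, h2⟩

-- Bool form of the Set.ofList membership, for the dedup invariants
theorem pvSetOfList_contains (L : List String) (k : String) :
    (PySem.Set.ofList L).contains k = decide (k ∈ L) := by
  rcases Bool.eq_false_or_eq_true ((PySem.Set.ofList L).contains k) with hk | hk <;> rw [hk] <;> symm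
  all_goals first
    | (rw [decide_eq_true_eq]
       exact (PySem.Set.mem_ofList L k).mp ((PySem.Set.contains_iff _ k).mp hk))
    | (rw [decide_eq_false_iff_not]
       intro hc
       have := (PySem.Set.contains_iff (PySem.Set.ofList L) k).mpr ((PySem.Set.mem_ofList L k).mpr hc)
       rw [hk] at this
       exact Bool.false_ne_true this)

-- ===== B-side lemmas: the occurrence index and the grouped emission =====

-- every tagged occurrence carries its line number
theorem pvTag_fst (ln : Int) (ps : List Nat) : ∀ q ∈ pvTag ln ps, q.1 = ln := by
  induction ps with
  | nil => intro q hq; simp [pvTag] at hq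
  | cons p ps ih =>
    intro q hq
    rcases List.mem_cons.mp hq with rfl | hq
    · rfl
    · exact ih q hq

-- one enumerated line, filtered at this word, is its pvPos position list tagged with the line
theorem pvEnumLine_filter (tw : String) (ln : Int) (ts : List String) :
    ∀ n : Nat,
      (((PySem.List.enumerate ts (n : Int)).map
          (fun r => (PySem.Str.lower r.2, (ln, r.1)))).filter (fun q => q.1 == tw)).map (·.2)
        = pvTag ln (pvPos tw (ts.map PySem.Str.lower) n) := by
  induction ts with
  | nil => intro n; simp [PySem.List.enumerate_nil, pvPos, pvTag]
  | cons x xs ih =>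
    intro n
    rw [PySem.List.enumerate_cons]
    have hn1 : ((n : Int) + 1) = ((n + 1 : Nat) : Int) := by push_cast; ring
    by_cases hx : PySem.Str.lower x = tw
    · simp only [List.map_cons, List.filter_cons]
      rw [show ((PySem.Str.lower x == tw) : Bool) = true by simp [hx]]
      simp only [if_true]
      rw [List.map_cons, hn1, ih (n + 1)]
      simp [pvPos, hx, pvTag]
    · simp only [List.map_cons, List.filter_cons]
      rw [show ((PySem.Str.lower x == tw) : Bool) = false by simp [hx]]
      simp only [Bool.false_eq_true, if_false]
      rw [hn1, ih (n + 1)]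
      simp [pvPos, hx]

-- the occurrence dict built by B: looked up at tw it is exactly pvFlatOcc tw toks 0
theorem pvOcc_getD (tw : String) (toks : List (List String)) :
    ∀ (s : Nat) (d : PySem.Dict String (List (Int × Int))),
      ((PySem.List.enumerate toks (s : Int)).foldl
        (fun occ q => (PySem.List.enumerate q.2 0).foldl
          (fun (occ : PySem.Dict String (List (Int × Int))) r =>
            occ.modify (PySem.Str.lower r.2) [] (· ++ [(q.1, r.1)]))
          occ)
        d).getD tw []
      = d.getD tw [] ++ pvFlatOcc tw toks s := by
  induction toks with
  | nil => intro s d; simp [PySem.List.enumerate_nil, pvFlatOcc]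
  | cons ts rest ih =>
    intro s d
    rw [PySem.List.enumerate_cons]
    simp only [List.foldl_cons]
    have hs1 : ((s : Int) + 1) = ((s + 1 : Nat) : Int) := by push_cast; ring
    rw [hs1, ih (s + 1)]
    -- the inner per-line fold, as a modify-fold over key/value pairs
    have hinner : ∀ (d' : PySem.Dict String (List (Int × Int))),
        ((PySem.List.enumerate ts 0).foldl
          (fun (occ : PySem.Dict String (List (Int × Int))) r =>
            occ.modify (PySem.Str.lower r.2) [] (· ++ [((s : Int), r.1)]))
          d').getD tw []
        = d'.getD tw [] ++ pvTag (s : Int) (pvPos tw (ts.map PySem.Str.lower) 0) := by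
      intro d'
      have hmap :
          ((PySem.List.enumerate ts 0).map
            (fun r => (PySem.Str.lower r.2, ((s : Int), r.1)))).foldl
            (fun (occ : PySem.Dict String (List (Int × Int))) p =>
              occ.modify p.1 [] (· ++ [p.2])) d'
          = (PySem.List.enumerate ts 0).foldl
              (fun (occ : PySem.Dict String (List (Int × Int))) r =>
                occ.modify (PySem.Str.lower r.2) [] (· ++ [((s : Int), r.1)])) d' := by
        rw [List.foldl_map]
      rw [← hmap, PySem.Dict.getD_foldl_modify_append]
      congr 1
      rw [show (PySem.List.enumerate ts 0) = (PySem.List.enumerate ts ((0 : Nat) : Int)) by norm_num]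
      exact pvEnumLine_filter tw (s : Int) ts 0
    rw [hinner d]
    simp [pvFlatOcc, List.append_assoc]

-- every tag in pvFlatOcc tw suf m is at least m
theorem pvFlatOcc_tags (tw : String) (suf : List (List String)) :
    ∀ (m : Nat) (q : Int × Int), q ∈ pvFlatOcc tw suf m → (m : Int) ≤ q.1 := by
  induction suf with
  | nil => intro m q hq; simp [pvFlatOcc] at hq
  | cons ts rest ih =>
    intro m q hq
    simp only [pvFlatOcc, List.mem_append] at hq
    rcases hq with hq | hq
    · rw [pvTag_fst _ _ q hq]
    · have := ih (m + 1) q hq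
      push_cast at this ⊢
      omega

-- the inner run-fold of pvGroupB is pvEmit at the run's positions
theorem pvRunFold_eq_emit (up : String) (ln : Int) :
    ∀ (ps : List Nat) (cur : List String) (st : List String × PySem.Dict String Int),
      ((pvTag ln ps).foldl
        (fun (acc : List String × List String × PySem.Dict String Int) q =>
          let cur' := PySem.List.pySetD acc.1 q.2 up
          let s := PySem.Str.join " " cur'
          (cur', acc.2.1 ++ [s], acc.2.2.insert s q.2))
        (cur, st)).2 = pvEmit up ps cur st := by
  intro ps
  induction ps with
  | nil => intro cur st; simp [pvTag, pvEmit]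
  | cons p ps ih =>
    intro cur st
    simp only [pvTag, List.foldl_cons]
    rw [show PySem.List.pySetD cur ((p : Nat) : Int) up = cur.set p up from
      PySem.List.pySetD_natCast cur p up]
    rw [ih]
    simp [pvEmit]

-- the grouped walk over the occurrence list is the per-line emission fold
theorem pvGroupB_eq_fold (tw up : String) (toks : List (List String)) :
    ∀ (suffix : List (List String)) (ln : Nat) (st : List String × PySem.Dict String Int),
      toks.drop ln = suffix →
      pvGroupB toks up (pvFlatOcc tw suffix ln) st
        = suffix.foldl
            (fun st ts => pvEmit up (pvPos tw (ts.map PySem.Str.lower) 0) ts st) st := by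
  intro suffix
  induction suffix with
  | nil =>
    intro ln st _
    simp only [pvFlatOcc, List.foldl_nil]
    rw [pvGroupB]
  | cons ts rest ih =>
    intro ln st hdrop
    have hts : toks[ln]? = some ts := by
      rw [← List.head?_drop, hdrop]; rfl
    have hdrop1 : toks.drop (ln + 1) = rest := by
      have h1 : (toks.drop ln).tail = toks.drop (ln + 1) := by
        rw [← List.drop_drop]
        simp [List.drop_one]
      rw [hdrop] at h1
      exact h1.symm
    simp only [pvFlatOcc]
    cases hpos : pvPos tw (ts.map PySem.Str.lower) 0 with
    | nil =>
      simp only [pvTag, List.nil_append, List.foldl_cons, hpos, pvEmit]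
      exact ih (ln + 1) st hdrop1
    | cons p ps =>
      simp only [pvTag, List.cons_append]
      rw [pvGroupB]
      have hcur : (PySem.List.pyGet? toks ((ln : Nat) : Int)).getD [] = ts := by
        rw [PySem.List.pyGet?_natCast, hts]; rfl
      -- every element of the run has tag ln; everything after has a larger tag
      have hrun : ∀ q ∈ pvTag ((ln : Nat) : Int) ps,
          ((fun (q : Int × Int) => q.1 == (((ln : Nat) : Int))) q) = true := by
        intro q hq
        simp only []
        rw [pvTag_fst _ _ q hq]
        simp
      have hneF : ∀ q ∈ pvFlatOcc tw rest (ln + 1),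
          ((fun (q : Int × Int) => q.1 == (((ln : Nat) : Int))) q) = false := by
        intro q hq
        have hle := pvFlatOcc_tags tw rest (ln + 1) q hq
        simp only [beq_eq_false_iff_ne, ne_eq]
        intro hq1
        rw [hq1] at hle
        push_cast at hle
        omega
      have hrest_take : (pvFlatOcc tw rest (ln + 1)).takeWhile
          (fun (q : Int × Int) => q.1 == (((ln : Nat) : Int))) = [] := by
        cases hfr : pvFlatOcc tw rest (ln + 1) with
        | nil => rfl
        | cons q qs =>
          have := hneF q (hfr ▸ List.mem_cons_self ..)
          simp [List.takeWhile_cons, this]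
      have hrest_drop : (pvFlatOcc tw rest (ln + 1)).dropWhile
          (fun (q : Int × Int) => q.1 == (((ln : Nat) : Int))) = pvFlatOcc tw rest (ln + 1) := by
        cases hfr : pvFlatOcc tw rest (ln + 1) with
        | nil => rfl
        | cons q qs =>
          have := hneF q (hfr ▸ List.mem_cons_self ..)
          simp [List.dropWhile_cons, this]
      have htake : (((((ln : Nat) : Int), (p : Int)) :: (pvTag ((ln : Nat) : Int) ps
            ++ pvFlatOcc tw rest (ln + 1))).takeWhile
            (fun (q : Int × Int) => q.1 == (((ln : Nat) : Int))))
          = (((ln : Nat) : Int), (p : Int)) :: pvTag ((ln : Nat) : Int) ps := by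
        rw [List.takeWhile_cons_of_pos (by simp)]
        rw [List.takeWhile_append_of_pos hrun, hrest_take]
        simp
      have hdropw : (((((ln : Nat) : Int), (p : Int)) :: (pvTag ((ln : Nat) : Int) ps
            ++ pvFlatOcc tw rest (ln + 1))).dropWhile
            (fun (q : Int × Int) => q.1 == (((ln : Nat) : Int))))
          = pvFlatOcc tw rest (ln + 1) := by
        rw [List.dropWhile_cons_of_pos (by simp)]
        rw [List.dropWhile_append_of_pos hrun, hrest_drop]
      simp only [htake, hdropw, hcur]
      have hfold := pvRunFold_eq_emit up (((ln : Nat) : Int)) (p :: ps) ts st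
      simp only [pvTag] at hfold
      rw [hfold]
      rw [ih (ln + 1) _ hdrop1]
      simp [List.foldl_cons, hpos]

-- ===== VERDICT =====
theorem unaligned_output_lines_spec : Claim_equal_unaligned_output_lines := by
  intro ex il hdom hpre
  unfold Spec_unaligned_output_lines
  unfold unaligned_output_lines unaligned_output_lines_alt
  simp only []
  -- phase 0: the flat token list
  rw [PySem.List.foldl_append_eq_flatMap, List.nil_append]
  rw [← List.foldl_flatten, ← List.flatMap_def]
  -- phase 1: dedup + exclusion on both sides
  have hA0 : (List.foldl
      (fun (st : PySem.Dict String String × List String) word =>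
        if st.1.contains (PySem.Str.lower word) then st
        else (st.1.insert (PySem.Str.lower word) (PySem.Str.lower word), st.2 ++ [word]))
      (PySem.Dict.empty, []) (il.flatMap PySem.Str.split₀)).2
      = pvDDA [] (il.flatMap PySem.Str.split₀) := by
    rw [pvDedupA_eq _ _ _ [] (by intro k; simp [PySem.Dict.contains_empty])]
    rfl
  rw [hA0]
  have hnd := (pvDDA_nodup_lower (il.flatMap PySem.Str.split₀) []).1
  rw [pvExcl_eq_filter ex _ hnd]
  rw [pvDDA_filter_eq_DDB (ex.map PySem.Str.lower) (il.flatMap PySem.Str.split₀) []]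
  have hB0 : (List.foldl
      (fun (st : PySem.Set String × List String) w =>
        if st.1.contains (PySem.Str.lower w) then st
        else (PySem.Set.add st.1 (PySem.Str.lower w),
              if (PySem.Set.ofList (ex.map PySem.Str.lower)).contains (PySem.Str.lower w) then st.2
              else st.2 ++ [w]))
      (PySem.Set.empty, []) (il.flatMap PySem.Str.split₀)).2
      = pvDDB (ex.map PySem.Str.lower) [] (il.flatMap PySem.Str.split₀) := by
    rw [pvDedupB_eq (PySem.Set.ofList (ex.map PySem.Str.lower)) (ex.map PySem.Str.lower)
        (pvSetOfList_contains _) _ _ _ [] (by intro k; simp)]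
    rfl
  rw [hB0]
  -- the surviving sorted words and the final loop
  set words := PySem.List.sorted (pvDDB (ex.map PySem.Str.lower) [] (il.flatMap PySem.Str.split₀))
    PySem.Str.lower with hwords
  set toks := il.map PySem.Str.split₀ with htoks
  have hloop : words.foldl (fun st word => il.foldl (pvLineA (PySem.Str.lower word)) st)
      ([], PySem.Dict.empty)
      = words.foldl (fun st word =>
          pvGroupB toks (PySem.Str.upper (PySem.Str.lower word))
            (((PySem.List.enumerate toks 0).foldl
              (fun occ q => (PySem.List.enumerate q.2 0).foldl
                (fun (occ : PySem.Dict String (List (Int × Int))) r =>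
                  occ.modify (PySem.Str.lower r.2) [] (· ++ [(q.1, r.1)]))
                occ)
              PySem.Dict.empty).getD (PySem.Str.lower word) []) st)
      ([], PySem.Dict.empty) := by
    apply PySem.List.foldl_congr_mem
    intro acc word hw
    have hmem : word ∈ pvDDB (ex.map PySem.Str.lower) [] (il.flatMap PySem.Str.split₀) :=
      (PySem.List.sorted_perm _ _ _).mem_iff.mp (hwords ▸ hw)
    obtain ⟨hw0, hnotex⟩ := pvDDB_mem _ _ _ _ hmem
    obtain ⟨line, hline, htok⟩ := List.mem_flatMap.mp hw0
    have htw : PySem.Str.upper (PySem.Str.lower word) ≠ PySem.Str.lower word :=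
      hpre line hline word htok hnotex
    set tw := PySem.Str.lower word with htwdef
    -- A side: per-line emission fold
    have hA : il.foldl (pvLineA tw) acc
        = toks.foldl
            (fun st ts => pvEmit (PySem.Str.upper tw) (pvPos tw (ts.map PySem.Str.lower) 0) ts st)
            acc := by
      rw [htoks, List.foldl_map]
      apply PySem.List.foldl_congr_mem
      intro a line _
      exact pvLineA_eq_emit tw htw a line
    -- B side: occurrence dict lookup plus grouped walk
    have hocc : ((PySem.List.enumerate toks 0).foldl
          (fun occ q => (PySem.List.enumerate q.2 0).foldl
            (fun (occ : PySem.Dict String (List (Int × Int))) r =>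
              occ.modify (PySem.Str.lower r.2) [] (· ++ [(q.1, r.1)]))
            occ)
          PySem.Dict.empty).getD tw []
        = pvFlatOcc tw toks 0 := by
      have h := pvOcc_getD tw toks 0 PySem.Dict.empty
      simp only [Nat.cast_zero] at h
      rw [h]
      simp
    rw [hA, hocc]
    exact (pvGroupB_eq_fold tw (PySem.Str.upper tw) toks toks 0 acc (by simp)).symm
  rw [hloop]
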